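-- pv_equiv track=rewrite | github.com/AstroBai/GuitarChords | GuitarChords.py | _pc_to_midi_near
-- ===== SOURCE A (Python) =====
-- def _pc_to_midi_near(pitch_class, target_midi=60):
--     candidate = target_midi - ((target_midi - pitch_class) % 12)
--     if candidate < target_midi:
--         above = candidate + 12
--         if abs(above - target_midi) < abs(candidate - target_midi):
--             candidate = above
--     while candidate < 48:
--         candidate += 12
--     while candidate > 84:
--         candidate -= 12
--     return candidate
-- ===== SOURCE B (Python) =====
-- def _pc_to_midi_near(pitch_class, target_midi=60):
--     base = 48 + (pitch_class - 48) % 12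
--     candidates = [base + 12 * i for i in range(4) if base + 12 * i <= 84]
--     return min(candidates, key=lambda n: (abs(n - target_midi), n))
-- ===== Notes on version B (the rewrite author's own statement) =====
-- stated objective: simpler
-- what changed: A computes the nearest note by closed-form modular arithmetic and then clamps it into [48,84] with two while loops; B instead enumerates the in-range notes of the pitch class directly and selects the nearest one with a single min using the key (abs distance, value) to break ties toward the lower note, so the clamp loops disappear.
import Mathlib
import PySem

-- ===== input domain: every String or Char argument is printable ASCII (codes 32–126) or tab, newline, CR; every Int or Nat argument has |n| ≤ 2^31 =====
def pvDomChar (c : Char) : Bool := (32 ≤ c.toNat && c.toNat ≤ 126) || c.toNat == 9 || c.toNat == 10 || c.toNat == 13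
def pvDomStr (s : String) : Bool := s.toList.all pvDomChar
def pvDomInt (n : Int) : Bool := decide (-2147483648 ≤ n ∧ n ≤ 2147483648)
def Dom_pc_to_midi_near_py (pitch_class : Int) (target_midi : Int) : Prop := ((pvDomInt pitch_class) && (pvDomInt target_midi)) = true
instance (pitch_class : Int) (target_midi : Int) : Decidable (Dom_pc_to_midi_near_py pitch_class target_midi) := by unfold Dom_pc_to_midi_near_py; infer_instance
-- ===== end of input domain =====

-- B replaces A's closed-form-plus-clamp-loops with a direct enumeration of the in-range
-- notes of the pitch class and one nearest-with-tie-to-lower min selection.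

-- ===== PORT A =====
-- 'while candidate < 48: candidate += 12'
def pvClampUp (c : Int) : Int :=
  if c < 48 then pvClampUp (c + 12) else c
termination_by (48 - c).toNat
decreasing_by omega

-- 'while candidate > 84: candidate -= 12'
def pvClampDown (c : Int) : Int :=
  if 84 < c then pvClampDown (c - 12) else c
termination_by (c - 84).toNat
decreasing_by omega

def pc_to_midi_near_py (pitch_class : Int) (target_midi : Int) : Int :=
  let candidate := target_midi - PySem.Int.mod (target_midi - pitch_class) 12
  let candidate :=
    if candidate < target_midi then
      let above := candidate + 12
      if |above - target_midi| < |candidate - target_midi| then above else candidate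
    else candidate
  pvClampDown (pvClampUp candidate)

-- ===== PORT B =====
def pc_to_midi_near_py_alt (pitch_class : Int) (target_midi : Int) : Int :=
  let base := 48 + PySem.Int.mod (pitch_class - 48) 12
  let candidates := (PySem.List.pyRange 0 4 1).filterMap
    (fun i => if base + 12 * i ≤ 84 then some (base + 12 * i) else none)
  match PySem.List.min2? candidates (fun n => |n - target_midi|) (fun n => n) with
  | some m => m
  | none => 0  -- unreachable: candidates always contains base (base ≤ 59 ≤ 84); Python min never sees an empty list

-- ===== PRECONDITION & SPEC =====
def Spec_pc_to_midi_near_py (pitch_class : Int) (target_midi : Int) (out : Int) : Prop := out = pc_to_midi_near_py_alt pitch_class target_midi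
instance (pitch_class : Int) (target_midi : Int) (out : Int) : Decidable (Spec_pc_to_midi_near_py pitch_class target_midi out) := by unfold Spec_pc_to_midi_near_py; infer_instance

-- ===== CLAIM (what is proved, stated in full; the proofs are below) =====
def Claim_equal_pc_to_midi_near_py : Prop := ∀ (pitch_class : Int) (target_midi : Int), Dom_pc_to_midi_near_py pitch_class target_midi → Spec_pc_to_midi_near_py pitch_class target_midi (pc_to_midi_near_py pitch_class target_midi)

-- ===== LEMMAS AND PROOFS =====

-- closed form of the 'while candidate < 48' loop
theorem pvClampUp_eq (c : Int) : pvClampUp c = if c < 48 then 48 + (c - 48) % 12 else c := by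
  induction c using pvClampUp.induct with
  | case1 c h ih =>
    rw [pvClampUp, if_pos h, ih]
    have h12 : (c + 12 - 48) % 12 = (c - 48) % 12 := by omega
    split_ifs with h2
    · omega
    · have := Int.emod_nonneg (c - 48) (show (12:Int) ≠ 0 by norm_num)
      have := Int.emod_lt_of_pos (c - 48) (show (0:Int) < 12 by norm_num)
      omega
  | case2 c h =>
    rw [pvClampUp, if_neg h, if_neg h]

-- closed form of the 'while candidate > 84' loop
theorem pvClampDown_eq (c : Int) : pvClampDown c = if 84 < c then 84 - (84 - c) % 12 else c := by
  induction c using pvClampDown.induct with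
  | case1 c h ih =>
    rw [pvClampDown, if_pos h, ih]
    have h12 : (84 - (c - 12)) % 12 = (84 - c) % 12 := by omega
    split_ifs with h2
    · omega
    · have := Int.emod_nonneg (84 - c) (show (12:Int) ≠ 0 by norm_num)
      have := Int.emod_lt_of_pos (84 - c) (show (0:Int) < 12 by norm_num)
      omega
  | case2 c h =>
    rw [pvClampDown, if_neg h, if_neg h]

-- common closed form both ports are reduced to
def pvF (pitch_class : Int) (target_midi : Int) : Int :=
  let r := (target_midi - pitch_class) % 12
  let c := if 12 - r < r then target_midi - r + 12 else target_midi - r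
  if c < 48 then 48 + (c - 48) % 12 else if 84 < c then 84 - (84 - c) % 12 else c

-- strict lexicographic minimality (key, value) of m among xs
def pvLex (k1 : Int → Int) (m y : Int) : Prop := k1 m < k1 y ∨ (k1 m = k1 y ∧ m < y)

theorem pvMin2Aux (k1 : Int → Int) (m : Int) (f : Option Int → Int → Option Int)
    (hfs : ∀ mm x, f (some mm) x =
      if k1 x < k1 mm ∨ (¬ k1 mm < k1 x ∧ x < mm) then some x else some mm) :
    ∀ (xs : List Int) (a : Int),
    (a = m ∨ pvLex k1 m a) → (∀ y ∈ xs, y = m ∨ pvLex k1 m y) → (m = a ∨ m ∈ xs) →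
    List.foldl f (some a) xs = some m := by
  intro xs
  induction xs with
  | nil =>
    intro a ha _ hm
    simp only [List.foldl_nil]
    rcases hm with hm | hm
    · rw [hm]
    · cases hm
  | cons x xs ih =>
    intro a ha hall hm
    simp only [List.foldl_cons, hfs]
    have hx := hall x (by simp)
    have hxs : ∀ y ∈ xs, y = m ∨ pvLex k1 m y := fun y hy => hall y (by simp [hy])
    by_cases hcond : k1 x < k1 a ∨ (¬ k1 a < k1 x ∧ x < a)
    · -- accumulator becomes x
      rw [if_pos hcond]
      apply ih x hx hxs
      rcases hm with hm | hm
      · -- acc was m; then x beating it forces x = m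
        rcases hx with hx | hx
        · left; exact hx.symm
        · exfalso; subst hm; unfold pvLex at hx
          rcases hx with h1 | ⟨h1, h2⟩ <;> rcases hcond with h3 | ⟨h3, h4⟩ <;> omega
      · rcases List.mem_cons.mp hm with hm' | hm'
        · left; exact hm'
        · right; exact hm'
    · rw [if_neg hcond]
      apply ih a ha hxs
      rcases hm with hm | hm
      · left; exact hm
      · rcases List.mem_cons.mp hm with hm' | hm'
        · -- x = m must beat any a ≠ m, so a = m
          rcases ha with ha | ha
          · left; exact ha.symm
          · exfalso; apply hcond; subst hm'; unfold pvLex at ha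
            rcases ha with h1 | ⟨h1, h2⟩
            · left; exact h1
            · right; exact ⟨by omega, h2⟩
        · right; exact hm'

theorem pvMin2Eq (k1 : Int → Int) (m x : Int) (xs : List Int)
    (hall : ∀ y ∈ x :: xs, y = m ∨ pvLex k1 m y) (hm : m ∈ x :: xs) :
    PySem.List.min2? (x :: xs) k1 (fun n => n) = some m := by
  show List.foldl _ none (x :: xs) = some m
  rw [List.foldl_cons]
  show List.foldl _ (some x) xs = some m
  refine pvMin2Aux k1 m _ ?_ xs x (hall x (by simp)) (fun y hy => hall y (by simp [hy])) ?_
  · intro mm y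
    by_cases h1 : k1 y < k1 mm <;> by_cases h2 : k1 mm < k1 y <;> by_cases h3 : y < mm <;>
      simp [h1, h2, h3]
  · rcases List.mem_cons.mp hm with h | h
    · left; exact h
    · right; exact h

theorem pvA_eq_F (pc t : Int) : pc_to_midi_near_py pc t = pvF pc t := by
  unfold pc_to_midi_near_py pvF
  rw [PySem.Int.mod_eq_emod_of_pos (by norm_num)]
  have hr0 := Int.emod_nonneg (t - pc) (show (12:Int) ≠ 0 by norm_num)
  have hr1 := Int.emod_lt_of_pos (t - pc) (show (0:Int) < 12 by norm_num)
  simp only [pvClampUp_eq, pvClampDown_eq]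
  have hm1 := Int.emod_nonneg (t - (t - pc) % 12 - 48) (show (12:Int) ≠ 0 by norm_num)
  have hm2 := Int.emod_lt_of_pos (t - (t - pc) % 12 - 48) (show (0:Int) < 12 by norm_num)
  have hm3 := Int.emod_nonneg (t - (t - pc) % 12 + 12 - 48) (show (12:Int) ≠ 0 by norm_num)
  have hm4 := Int.emod_lt_of_pos (t - (t - pc) % 12 + 12 - 48) (show (0:Int) < 12 by norm_num)
  split_ifs <;> (try simp_all only [Int.abs_eq_natAbs]) <;> omega

theorem pvB_eq_F (pc t : Int) : pc_to_midi_near_py_alt pc t = pvF pc t := by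
  unfold pc_to_midi_near_py_alt
  rw [PySem.Int.mod_eq_emod_of_pos (by norm_num)]
  have hk0 := Int.emod_nonneg (pc - 48) (show (12:Int) ≠ 0 by norm_num)
  have hk1 := Int.emod_lt_of_pos (pc - 48) (show (0:Int) < 12 by norm_num)
  have hr0 := Int.emod_nonneg (t - pc) (show (12:Int) ≠ 0 by norm_num)
  have hr1 := Int.emod_lt_of_pos (t - pc) (show (0:Int) < 12 by norm_num)
  -- bounds on the closed form
  have hF1 : pvF pc t % 12 = (pc - 48) % 12 := by
    simp only [pvF]
    have hm1 := Int.emod_nonneg (t - (t - pc) % 12 - 48) (show (12:Int) ≠ 0 by norm_num)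
    have hm2 := Int.emod_lt_of_pos (t - (t - pc) % 12 - 48) (show (0:Int) < 12 by norm_num)
    have hm3 := Int.emod_nonneg (84 - (if 12 - (t - pc) % 12 < (t - pc) % 12 then t - (t - pc) % 12 + 12 else t - (t - pc) % 12)) (show (12:Int) ≠ 0 by norm_num)
    split_ifs <;> omega
  have hF2 : 48 ≤ pvF pc t ∧ pvF pc t ≤ 84 := by
    simp only [pvF]
    have hm1 := Int.emod_nonneg (t - (t - pc) % 12 - 48) (show (12:Int) ≠ 0 by norm_num)
    have hm2 := Int.emod_lt_of_pos (t - (t - pc) % 12 - 48) (show (0:Int) < 12 by norm_num)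
    have hm3 := Int.emod_nonneg (84 - (if 12 - (t - pc) % 12 < (t - pc) % 12 then t - (t - pc) % 12 + 12 else t - (t - pc) % 12)) (show (12:Int) ≠ 0 by norm_num)
    have hm4 := Int.emod_lt_of_pos (84 - (if 12 - (t - pc) % 12 < (t - pc) % 12 then t - (t - pc) % 12 + 12 else t - (t - pc) % 12)) (show (0:Int) < 12 by norm_num)
    split_ifs <;> omega
  -- nearest-with-tie-to-lower: pvF is lex-minimal among all in-range notes of the class
  have hF3 : ∀ y : Int, 48 ≤ y → y ≤ 84 → y % 12 = (pc - 48) % 12 → y = pvF pc t ∨ pvLex (fun n => |n - t|) (pvF pc t) y := by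
    intro y hy1 hy2 hy3
    simp only [pvF]
    simp only [pvF] at hF1 hF2
    unfold pvLex
    have hm1 := Int.emod_nonneg (t - (t - pc) % 12 - 48) (show (12:Int) ≠ 0 by norm_num)
    have hm2 := Int.emod_lt_of_pos (t - (t - pc) % 12 - 48) (show (0:Int) < 12 by norm_num)
    have hm3 := Int.emod_nonneg (84 - (if 12 - (t - pc) % 12 < (t - pc) % 12 then t - (t - pc) % 12 + 12 else t - (t - pc) % 12)) (show (12:Int) ≠ 0 by norm_num)
    have hm4 := Int.emod_lt_of_pos (84 - (if 12 - (t - pc) % 12 < (t - pc) % 12 then t - (t - pc) % 12 + 12 else t - (t - pc) % 12)) (show (0:Int) < 12 by norm_num)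
    simp only [Int.abs_eq_natAbs]
    split_ifs at * <;> omega
  -- evaluate the candidate list
  simp only [show PySem.List.pyRange 0 4 1 = [0, 1, 2, 3] from by decide, List.filterMap]
  by_cases hbase : (pc - 48) % 12 = 0
  · norm_num [hbase]
    rw [pvMin2Eq (fun n => |n - t|) (pvF pc t) 48 [60, 72, 84]
      (by intro y hy
          have hy' : y = 48 ∨ y = 60 ∨ y = 72 ∨ y = 84 := by simpa using hy
          rcases hy' with h | h | h | h <;> subst h <;> exact hF3 _ (by omega) (by omega) (by omega))
      (by have := hF3 (pvF pc t) hF2.1 hF2.2 hF1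
          have hmem : pvF pc t = 48 ∨ pvF pc t = 60 ∨ pvF pc t = 72 ∨ pvF pc t = 84 := by omega
          simpa using hmem)]
  · have hconds : 48 + (pc - 48) % 12 + 12 * 0 ≤ 84 ∧ 48 + (pc - 48) % 12 + 12 * 1 ≤ 84 ∧
        48 + (pc - 48) % 12 + 12 * 2 ≤ 84 ∧ ¬(48 + (pc - 48) % 12 + 12 * 3 ≤ 84) := by omega
    simp only [if_pos hconds.1, if_pos hconds.2.1, if_pos hconds.2.2.1, if_neg hconds.2.2.2]
    rw [pvMin2Eq (fun n => |n - t|) (pvF pc t) (48 + (pc - 48) % 12 + 12 * 0)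
        [48 + (pc - 48) % 12 + 12 * 1, 48 + (pc - 48) % 12 + 12 * 2]
      (by intro y hy
          have hy' : y = 48 + (pc - 48) % 12 + 12 * 0 ∨ y = 48 + (pc - 48) % 12 + 12 * 1 ∨
              y = 48 + (pc - 48) % 12 + 12 * 2 := by simpa using hy
          rcases hy' with h | h | h <;> subst h <;> exact hF3 _ (by omega) (by omega) (by omega))
      (by have := hF3 (pvF pc t) hF2.1 hF2.2 hF1
          have hmem : pvF pc t = 48 + (pc - 48) % 12 + 12 * 0 ∨ pvF pc t = 48 + (pc - 48) % 12 + 12 * 1 ∨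
              pvF pc t = 48 + (pc - 48) % 12 + 12 * 2 := by omega
          simpa using hmem)]

-- ===== VERDICT (by name: the statement is the Claim_ definition above) =====
theorem pc_to_midi_near_py_spec : Claim_equal_pc_to_midi_near_py := by
  intro pc t _
  unfold Spec_pc_to_midi_near_py
  rw [pvA_eq_F, pvB_eq_F]
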